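-- pv_equiv track=rewrite | github.com/jorgesmu/algorithm_exercises | arrays/kth_most_frequent_string.py | kth_most_frequent
-- ===== SOURCE A (Python) =====
-- def kth_most_frequent(words, k):
-- 	if k > len(words):
-- 		return None
--
-- 	frequencies = {}
-- 	for word in words:
-- 		if word in frequencies:
-- 			frequencies[word] += 1
-- 		else:
-- 			frequencies[word] = 1
--
-- 	if k >= len(frequencies):
-- 		return None
--
-- 	frequencies = sorted(frequencies.items(), key=lambda x:x[1])
-- 	return frequencies[k-1][0]
-- ===== SOURCE B (Python) =====
-- def kth_most_frequent(words, k):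
-- 	if k > len(words):
-- 		return None
--
-- 	freq = {}
-- 	for word in words:
-- 		if word in freq:
-- 			freq[word] += 1
-- 		else:
-- 			freq[word] = 1
--
-- 	if k >= len(freq):
-- 		return None
--
-- 	buckets = {}
-- 	for word, c in freq.items():
-- 		buckets.setdefault(c, []).append(word)
--
-- 	ordered = []
-- 	for c in range(1, max(buckets) + 1):
-- 		ordered.extend(buckets.get(c, []))
--
-- 	return ordered[k - 1]
-- ===== Notes on version B (the rewrite author's own statement) =====
-- stated objective: alternative
-- what changed: Replaces the comparison sort of the frequency items with a counting/bucket sort: words are grouped into buckets keyed by their count and concatenated for counts 1..max, preserving the stable first-occurrence tie-break.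
import Mathlib
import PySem

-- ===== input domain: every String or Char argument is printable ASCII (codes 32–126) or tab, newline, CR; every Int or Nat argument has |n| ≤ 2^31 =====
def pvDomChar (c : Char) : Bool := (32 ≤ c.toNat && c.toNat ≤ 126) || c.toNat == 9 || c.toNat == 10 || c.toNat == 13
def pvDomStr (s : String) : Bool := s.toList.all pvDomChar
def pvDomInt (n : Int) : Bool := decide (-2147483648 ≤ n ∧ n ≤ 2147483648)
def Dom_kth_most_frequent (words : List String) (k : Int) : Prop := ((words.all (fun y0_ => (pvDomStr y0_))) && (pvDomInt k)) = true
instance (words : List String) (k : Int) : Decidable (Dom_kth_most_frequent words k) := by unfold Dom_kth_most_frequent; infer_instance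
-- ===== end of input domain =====

-- B replaces A's comparison sort of the frequency items by a counting/bucket sort over counts 1..max
-- (same counting loop and guards, same stable first-occurrence tie-break).

-- ===== PORT A =====
def kth_most_frequent (words : List String) (k : Int) : Option String :=
  if k > PySem.List.len words then none
  else
    let frequencies := words.foldl (fun d word =>
      if d.contains word then d.insert word (d.getD word 0 + 1)
      else d.insert word 1) (PySem.Dict.empty : PySem.Dict String Int)
    if k ≥ (PySem.Dict.size frequencies : Int) then none
    else
      -- frequencies = sorted(frequencies.items(), key=lambda x:x[1]); return frequencies[k-1][0]
      (PySem.List.pyGet? (PySem.List.sorted frequencies.items (fun x => x.2)) (k - 1)).map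
        (fun p => p.1)

-- ===== PORT B =====
def kth_most_frequent_alt (words : List String) (k : Int) : Option String :=
  if k > PySem.List.len words then none
  else
    let freq := words.foldl (fun d word =>
      if d.contains word then d.insert word (d.getD word 0 + 1)
      else d.insert word 1) (PySem.Dict.empty : PySem.Dict String Int)
    if k ≥ (PySem.Dict.size freq : Int) then none
    else
      -- buckets.setdefault(c, []).append(word)  ==  buckets[c] = buckets.get(c, []) + [word]  ==  modify
      let buckets := freq.items.foldl
        (fun d p => d.modify p.2 [] (fun ws => ws ++ [p.1]))
        (PySem.Dict.empty : PySem.Dict Int (List String))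
      match PySem.List.max? buckets.keys (fun c => c) with
      | none => none   -- max(buckets) raises ValueError here (empty dict); unreachable under Pre_
      | some maxc =>
        let ordered := (PySem.List.pyRange 1 (maxc + 1) 1).foldl
          (fun acc c => acc ++ buckets.getD c []) []
        PySem.List.pyGet? ordered (k - 1)

-- ===== PRECONDITION & SPEC =====
-- Pre_ excludes exactly the inputs where A raises IndexError (k so negative that frequencies[k-1]
-- is out of range); B raises there too (ValueError or IndexError), so no returning input is excluded.
def Pre_kth_most_frequent (words : List String) (k : Int) : Prop :=
  ¬ (k < 0 ∧ k ≤ -((PySem.List.dedup words).length : Int))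
instance (words : List String) (k : Int) : Decidable (Pre_kth_most_frequent words k) := by unfold Pre_kth_most_frequent; infer_instance

def pvWitness_kth_most_frequent : List String × Int := (["a", "b", "a"], 1)

def Spec_kth_most_frequent (words : List String) (k : Int) (out : Option String) : Prop := out = kth_most_frequent_alt words k
instance (words : List String) (k : Int) (out : Option String) : Decidable (Spec_kth_most_frequent words k out) := by unfold Spec_kth_most_frequent; infer_instance

-- ===== CLAIM (what is proved, stated in full; the proofs are below) =====
def Claim_equal_kth_most_frequent : Prop := ∀ (words : List String) (k : Int), Dom_kth_most_frequent words k → Pre_kth_most_frequent words k → Spec_kth_most_frequent words k (kth_most_frequent words k)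

-- ===== LEMMAS AND PROOFS =====

-- xs[i] commutes with mapping a function over xs.
theorem pv_pyGet?_map {A B : Type} (f : A → B) (xs : List A) (i : Int) :
    (PySem.List.pyGet? xs i).map f = PySem.List.pyGet? (xs.map f) i := by
  simp [PySem.List.pyGet?, PySem.List.pyIdx?]

-- insertBy skips a prefix none of whose elements x goes before.
theorem pv_insertBy_append {A : Type} (before : A → A → Bool) (x : A) (l r : List A)
    (h : ∀ y ∈ l, before x y = false) :
    PySem.List.insertBy before x (l ++ r) = l ++ PySem.List.insertBy before x r := by
  induction l with
  | nil => simp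
  | cons y t ih =>
    have hy : before x y = false := h y (by simp)
    simp [PySem.List.insertBy, hy, ih (fun z hz => h z (by simp [hz]))]

-- insertBy puts x in front when x goes before every element.
theorem pv_insertBy_front {A : Type} (before : A → A → Bool) (x : A) (ys : List A)
    (h : ∀ y ∈ ys, before x y = true) :
    PySem.List.insertBy before x ys = x :: ys := by
  cases ys with
  | nil => rfl
  | cons y t => simp [PySem.List.insertBy, h y (by simp)]

-- inserting x into a concatenation of key-homogeneous blocks with strictly increasing keys
-- appends x at the end of its own block (the stable-insertion step).
theorem pv_insertBy_blocks {A : Type} (key : A → Int) (x : A) (cs : List Int) (g : Int → List A)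
    (hg : ∀ c, ∀ y ∈ g c, key y = c) (hcs : cs.Pairwise (· < ·)) (hx : key x ∈ cs) :
    PySem.List.insertBy (fun a b => decide (key a < key b)) x (cs.flatMap g)
      = cs.flatMap (fun c => g c ++ if key x = c then [x] else []) := by
  induction cs with
  | nil => simp at hx
  | cons c cs ih =>
    rw [List.pairwise_cons] at hcs
    obtain ⟨hlt, htl⟩ := hcs
    rw [List.flatMap_cons, List.flatMap_cons]
    by_cases hxc : key x = c
    · have hskip : ∀ y ∈ g c, (decide (key x < key y)) = false := by
        intro y hy; simp [hg c y hy, hxc]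
      rw [pv_insertBy_append _ _ _ _ hskip]
      have hfront : ∀ y ∈ cs.flatMap g, (decide (key x < key y)) = true := by
        intro y hy
        obtain ⟨c', hc', hyg⟩ := List.mem_flatMap.mp hy
        simp [hg c' y hyg, hxc]
        exact hlt c' hc'
      rw [pv_insertBy_front _ _ _ hfront]
      have htail : cs.flatMap (fun c' => g c' ++ if key x = c' then [x] else []) = cs.flatMap g := by
        apply List.flatMap_congr
        intro c' hc'
        have hne : key x ≠ c' := by have := hlt c' hc'; omega
        simp [hne]
      rw [htail]
      simp [hxc]
    · have hxcs : key x ∈ cs := by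
        rcases List.mem_cons.mp hx with h | h
        · exact absurd h hxc
        · exact h
      have hskip : ∀ y ∈ g c, (decide (key x < key y)) = false := by
        intro y hy
        have hc : c < key x := hlt _ hxcs
        simp [hg c y hy]; omega
      rw [pv_insertBy_append _ _ _ _ hskip, ih htl hxcs]
      simp [hxc]

-- a stable sort by an Int key is the concatenation, over any strictly increasing list of counts
-- covering all keys, of the same-key sublists in original order (counting/bucket sort is correct).
theorem pv_sorted_eq_flatMap {A : Type} (key : A → Int) (cs : List Int)
    (hcs : cs.Pairwise (· < ·)) :
    ∀ xs : List A, (∀ x ∈ xs, key x ∈ cs) →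
      PySem.List.sorted xs key = cs.flatMap (fun c => xs.filter (fun y => decide (key y = c))) := by
  intro xs
  induction xs using List.reverseRecOn with
  | nil => intro _; rw [PySem.List.sorted_eq_foldl_insertBy]; simp
  | append_singleton xs x ih =>
    intro hmem
    rw [PySem.List.sorted_eq_foldl_insertBy, List.foldl_append]
    simp only [List.foldl_cons, List.foldl_nil]
    rw [← PySem.List.sorted_eq_foldl_insertBy]
    rw [ih (fun y hy => hmem y (by simp [hy]))]
    rw [pv_insertBy_blocks key x cs _
      (by intro c y hy; simpa using (List.mem_filter.mp hy).2) hcs (hmem x (by simp))]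
    apply List.flatMap_congr
    intro c hc
    by_cases h : key x = c <;> simp [h]

-- max? with identity key returns some on a nonempty Int list.
theorem pv_max?_isSome (xs : List Int) (h : xs ≠ []) :
    ∃ m, PySem.List.max? xs (fun c => c) = some m := by
  have aux : ∀ (f : Option Int → Int → Option Int),
      (∀ (o x : Int), ∃ m', f (some o) x = some m') →
      ∀ (ys : List Int) (o : Int), ∃ m, List.foldl f (some o) ys = some m := by
    intro f hf ys
    induction ys with
    | nil => intro o; exact ⟨o, rfl⟩
    | cons y t iht =>
      intro o
      simp only [List.foldl_cons]
      obtain ⟨m', hm'⟩ := hf o y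
      rw [hm']
      exact iht m'
  cases xs with
  | nil => exact absurd rfl h
  | cons x t =>
    simp only [PySem.List.max?, List.foldl_cons]
    exact aux _ (by
      intro o y
      refine ⟨if o < y then y else o, ?_⟩
      by_cases hlt : o < y <;> simp [hlt]) t x

-- ===== VERDICT (by name: the statement is the Claim_ definition above) =====
theorem kth_most_frequent_spec : Claim_equal_kth_most_frequent := by
  intro words k _hdom hpre
  unfold Spec_kth_most_frequent kth_most_frequent kth_most_frequent_alt
  by_cases h1 : k > PySem.List.len words
  · rw [if_pos h1, if_pos h1]
  rw [if_neg h1, if_neg h1]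
  try dsimp only
  set F := words.foldl (fun d word =>
      if d.contains word then d.insert word (d.getD word 0 + 1)
      else d.insert word 1) (PySem.Dict.empty : PySem.Dict String Int) with hFdef
  have hF : F = PySem.Dict.counter words := by
    rw [hFdef, ← PySem.Dict.foldl_insert_getD_add_one_eq_counter]
    apply List.foldl_ext
    intro d w _
    by_cases hc : d.contains w
    · simp [hc]
    · have : d.getD w 0 = 0 := PySem.Dict.getD_of_not_contains d 0 (by simpa using hc)
      simp [hc, this]
  have hitems : F.items = (PySem.Set.ofList words).map (fun w => (w, (words.count w : Int))) := by
    rw [hF]; exact PySem.Dict.items_counter words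
  by_cases h2 : k ≥ (PySem.Dict.size F : Int)
  · rw [if_pos h2, if_pos h2]
  rw [if_neg h2, if_neg h2]
  try dsimp only
  -- from here on both reach the third stage; the frequency dict is nonempty
  have hsize : (PySem.Dict.size F : Int) = (F.items.length : Int) := by rfl
  have hlen : F.items.length = (PySem.List.dedup words).length := by
    rw [hitems, List.length_map, PySem.List.dedup_eq_ofList]
  have hne : F.items ≠ [] := by
    intro hnil
    have h0 : F.items.length = 0 := by rw [hnil]; rfl
    have hk0 : k < 0 := by
      have := h2; rw [hsize] at this; omega
    exact hpre ⟨hk0, by rw [← hlen, h0]; omega⟩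
  have hpos : ∀ p ∈ F.items, 1 ≤ p.2 := by
    rw [hitems]
    intro p hp
    obtain ⟨w, hw, rfl⟩ := List.mem_map.mp hp
    have hwm : w ∈ words := (PySem.Set.mem_ofList words w).mp hw
    have : 0 < words.count w := List.count_pos_iff.mpr hwm
    simpa using this
  set buckets := F.items.foldl
      (fun d p => d.modify p.2 [] (fun ws => ws ++ [p.1]))
      (PySem.Dict.empty : PySem.Dict Int (List String)) with hBdef
  have hkeys : buckets.keys = PySem.Set.ofList (F.items.map (fun p => p.2)) := by
    rw [hBdef,
      PySem.Dict.keys_foldl_modify_key F.items (fun p => p.2) [] (fun _ p => (fun ws => ws ++ [p.1]))]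
    simp [PySem.Set.update_nil_left]
  have hkeysne : buckets.keys ≠ [] := by
    rw [hkeys]
    obtain ⟨p, hp⟩ := List.exists_mem_of_ne_nil _ hne
    intro hnil
    have : p.2 ∈ PySem.Set.ofList (F.items.map (fun p => p.2)) :=
      (PySem.Set.mem_ofList _ _).mpr (List.mem_map_of_mem hp)
    rw [hnil] at this
    simp at this
  obtain ⟨maxc, hmax⟩ := pv_max?_isSome buckets.keys hkeysne
  rw [hmax]
  have hle : ∀ p ∈ F.items, p.2 ≤ maxc := by
    intro p hp
    have hmem : p.2 ∈ buckets.keys := by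
      rw [hkeys]; exact (PySem.Set.mem_ofList _ _).mpr (List.mem_map_of_mem hp)
    exact PySem.List.max?_isMax hmax p.2 hmem
  have hbget : ∀ c : Int, buckets.getD c []
      = (F.items.filter (fun p => decide (p.2 = c))).map (fun p => p.1) := by
    intro c
    have hswap : buckets = (F.items.map (fun p => (p.2, p.1))).foldl
        (fun d q => d.modify q.1 [] (fun ws => ws ++ [q.2]))
        (PySem.Dict.empty : PySem.Dict Int (List String)) := by
      rw [hBdef, List.foldl_map]
    rw [hswap, PySem.Dict.getD_foldl_modify_append]
    rw [List.filter_map, List.map_map]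
    simp only [PySem.Dict.getD_empty, List.nil_append]
    rfl
  have hordered : (PySem.List.pyRange 1 (maxc + 1) 1).foldl
        (fun acc c => acc ++ buckets.getD c []) []
      = (PySem.List.sorted F.items (fun p => p.2)).map (fun p => p.1) := by
    rw [PySem.List.foldl_append_eq_flatMap, List.nil_append]
    rw [pv_sorted_eq_flatMap (fun p => p.2) (PySem.List.pyRange 1 (maxc + 1) 1)
      (PySem.List.pairwise_lt_pyRange_one 1 (maxc + 1)) F.items
      (by intro p hp
          rw [PySem.List.mem_pyRange_one]
          refine ⟨hpos p hp, ?_⟩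
          show p.2 < maxc + 1
          have := hle p hp; omega)]
    rw [List.map_flatMap]
    apply List.flatMap_congr
    intro c _
    rw [hbget c]
  rw [pv_pyGet?_map]
  show PySem.List.pyGet? _ (k - 1)
      = PySem.List.pyGet? ((PySem.List.pyRange 1 (maxc + 1) 1).foldl
          (fun acc c => acc ++ buckets.getD c []) []) (k - 1)
  rw [hordered]
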